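-- pv_equiv track=rewrite | github.com/tejasv007/DSA | Stack/stack3.py | NGE1
-- ===== SOURCE A (Python) =====
-- def NGE1(arr:list):
--     ans=[]
--     for i in range(len(arr)-1):
--         if max(arr[i+1:]) <arr[i]:
--             ans.append(-1)
--         else:
--             ans.append(max(arr[i+1:]))
--     ans.append(-1)
--     return ans
-- ===== SOURCE B (Python) =====
-- def NGE1(arr: list):
--     # one right-to-left pass keeping the running suffix maximum
--     ans = []
--     best = None
--     for x in reversed(arr):
--         if best is None:
--             ans.append(-1)
--         elif best >= x:
--             ans.append(best)
--         else:
--             ans.append(-1)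
--         if best is None or x > best:
--             best = x
--     ans.reverse()
--     return ans
-- ===== Notes on version B (the rewrite author's own statement) =====
-- stated objective: faster
-- what changed: Replaces the per-index recomputation of max(arr[i+1:]) by a single right-to-left pass that maintains the running suffix maximum.
-- intended difference: On the empty list A returns [-1] (a leftover of its unconditional final append) while B returns [], the intended answer-per-element shape for empty input. — e.g. on NGE1([]): A returns [-1], B returns []
import Mathlib
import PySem

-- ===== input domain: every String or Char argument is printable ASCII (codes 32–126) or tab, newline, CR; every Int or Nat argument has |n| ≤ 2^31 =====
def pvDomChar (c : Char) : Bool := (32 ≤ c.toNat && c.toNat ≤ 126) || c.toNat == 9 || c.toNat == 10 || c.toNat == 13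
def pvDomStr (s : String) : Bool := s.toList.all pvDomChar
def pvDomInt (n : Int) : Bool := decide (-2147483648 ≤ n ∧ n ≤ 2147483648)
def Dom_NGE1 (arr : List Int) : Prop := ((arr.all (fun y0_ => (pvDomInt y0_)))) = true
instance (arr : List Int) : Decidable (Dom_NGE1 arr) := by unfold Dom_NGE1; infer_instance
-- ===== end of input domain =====

-- B replaces A's quadratic recomputation of max(arr[i+1:]) at every index by one
-- right-to-left pass with a running suffix maximum (asymptotically faster).

-- ===== PORT A =====
-- entry appended at index i: max(arr[i+1:]) compared with arr[i]
-- (the 'none' branch is unreachable: for i < len(arr)-1 the slice arr[i+1:] is nonempty)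
def entryA (arr : List Int) (i : Nat) : Int :=
  match PySem.List.max? (arr.drop (i + 1)) (fun y => y) with
  | some m => if m < arr.getD i 0 then -1 else m
  | none => 0

def NGE1 (arr : List Int) : List Int :=
  ((List.range (arr.length - 1)).foldl (fun ans i => ans ++ [entryA arr i]) []) ++ [-1]

-- ===== PORT B =====
-- fold state: (reversed answers so far, running maximum of the elements seen so far)
def stepB (st : List Int × Option Int) (x : Int) : List Int × Option Int :=
  (match st.2 with
   | none => st.1 ++ [-1]
   | some b => if b ≥ x then st.1 ++ [b] else st.1 ++ [-1],
   match st.2 with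
   | none => some x
   | some b => if x > b then some x else some b)

def NGE1_alt (arr : List Int) : List Int :=
  ((arr.reverse.foldl stepB ([], none)).1).reverse

-- ===== PRECONDITION & SPEC =====
-- On the empty list A returns [-1] (its unconditional final append fires even with no
-- elements) while B returns [], the intended one-answer-per-element result.
def D_NGE1 (arr : List Int) : Prop := arr = []
instance (arr : List Int) : Decidable (D_NGE1 arr) := by unfold D_NGE1; infer_instance
def Spec_NGE1 (arr : List Int) (out : List Int) : Prop := ¬ D_NGE1 arr → out = NGE1_alt arr
instance (arr : List Int) (out : List Int) : Decidable (Spec_NGE1 arr out) := by unfold Spec_NGE1; infer_instance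
def pvDiffWitness_NGE1 : List Int := []
def pvDiffWitnessOut_NGE1 : (List Int) × (List Int) := ([-1], [])

-- ===== CLAIM (what is proved, stated in full; the proofs are below) =====
def Claim_unchanged_NGE1 : Prop := ∀ (arr : List Int), Dom_NGE1 arr → Spec_NGE1 arr (NGE1 arr)
def Claim_changed_NGE1 : Prop := Dom_NGE1 (pvDiffWitness_NGE1) ∧ D_NGE1 (pvDiffWitness_NGE1) ∧ NGE1 (pvDiffWitness_NGE1) = pvDiffWitnessOut_NGE1.1 ∧ NGE1_alt (pvDiffWitness_NGE1) = pvDiffWitnessOut_NGE1.2 ∧ pvDiffWitnessOut_NGE1.1 ≠ pvDiffWitnessOut_NGE1.2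
def Claim_exact_NGE1 : Prop := ∀ (arr : List Int), Dom_NGE1 arr → D_NGE1 arr → NGE1 arr ≠ NGE1_alt arr

-- ===== LEMMAS AND PROOFS =====

-- the common specification: per element, the suffix max if it is ≥ the element, else -1
def nge : List Int → List Int
  | [] => []
  | x :: xs =>
    (match PySem.List.max? xs (fun y => y) with
     | none => (-1 : Int)
     | some m => if m < x then -1 else m) :: nge xs

theorem max?_id_cons' (x : Int) (xs : List Int) :
    PySem.List.max? (x :: xs) (fun y => y) =
      some (match PySem.List.max? xs (fun y => y) with
            | none => x
            | some b => if x > b then x else b) := by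
  cases xs with
  | nil => simp [PySem.List.max?]
  | cons y t =>
    rw [PySem.List.max?_id_cons, PySem.List.max?_id_cons]
    have : List.foldl max x (y :: t) = max x (List.foldl max y t) := by
      show List.foldl max (max x y) t = _
      exact List.foldl_assoc
    simp only [this]
    congr 1
    rcases lt_or_ge (List.foldl max y t) x with h | h
    · rw [if_pos h, max_eq_left h.le]
    · rw [if_neg (not_lt.mpr h), max_eq_right h]

theorem entryA_cons (x : Int) (xs : List Int) (i : Nat) :
    entryA (x :: xs) (i + 1) = entryA xs i := by
  simp [entryA]

-- port A computes nge on every nonempty list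
theorem NGE1_eq_nge (arr : List Int) (h : arr ≠ []) : NGE1 arr = nge arr := by
  induction arr with
  | nil => exact absurd rfl h
  | cons x xs ih =>
    cases xs with
    | nil => simp [NGE1, nge, entryA, PySem.List.max?]
    | cons y t =>
      have hlen : (x :: y :: t).length - 1 = (y :: t).length := by simp
      rw [NGE1, PySem.List.foldl_append_singleton_eq_map, hlen]
      have hr : List.range (y :: t).length = 0 :: (List.range ((y :: t).length - 1)).map Nat.succ := by
        simp [List.range_succ_eq_map]
      rw [hr]
      simp only [List.map_cons, List.map_map, List.nil_append, List.cons_append]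
      have hmap : ((List.range ((y :: t).length - 1)).map (entryA (x :: y :: t) ∘ Nat.succ))
          = (List.range ((y :: t).length - 1)).map (entryA (y :: t)) := by
        apply List.map_congr_left
        intro i _
        exact entryA_cons x (y :: t) i
      rw [hmap]
      have hswap : (match PySem.List.max? (y :: t) fun y => y with
            | some m => if m < x then (-1 : Int) else m
            | none => 0)
          = (match PySem.List.max? (y :: t) fun y => y with
            | none => (-1 : Int)
            | some m => if m < x then -1 else m) := by
        cases hm : PySem.List.max? (y :: t) fun y => y with
        | none => exact absurd ((PySem.List.max?_eq_none_iff _ _).mp hm) (by simp)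
        | some m => rfl
      have hA : entryA (x :: y :: t) 0
          = (match PySem.List.max? (y :: t) (fun y => y) with
             | none => (-1 : Int)
             | some m => if m < x then -1 else m) := by
        rw [entryA]
        simpa using hswap
      rw [hA, nge, ← ih (by simp), NGE1, PySem.List.foldl_append_singleton_eq_map]
      simp

-- the invariant of B's single right-to-left pass
theorem stepB_inv (arr : List Int) :
    arr.reverse.foldl stepB ([], none) = ((nge arr).reverse, PySem.List.max? arr (fun y => y)) := by
  induction arr with
  | nil => simp [nge, PySem.List.max?]
  | cons x xs ih =>
    rw [List.reverse_cons, List.foldl_append, ih]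
    rw [max?_id_cons', nge]
    cases hm : PySem.List.max? xs (fun y => y) with
    | none =>
      have hxs : xs = [] := (PySem.List.max?_eq_none_iff _ _).mp hm
      subst hxs
      simp [stepB, nge, PySem.List.max?] at hm ⊢
    | some b =>
      simp only [List.foldl_cons, List.foldl_nil, stepB, List.reverse_cons]
      rcases lt_or_ge b x with h | h
      · rw [if_neg (not_le.mpr h)]
        simp [h]
      · rw [if_pos h]
        simp [not_lt.mpr h]

theorem NGE1_alt_eq_nge (arr : List Int) : NGE1_alt arr = nge arr := by
  rw [NGE1_alt, stepB_inv]
  simp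

-- ===== VERDICT (by name: the statement is the Claim_ definition above) =====
theorem NGE1_spec : Claim_unchanged_NGE1 := by
  intro arr _ hD
  rw [NGE1_alt_eq_nge]
  exact NGE1_eq_nge arr hD

theorem NGE1_changed : Claim_changed_NGE1 := by unfold Claim_changed_NGE1; decide

theorem NGE1_tight : Claim_exact_NGE1 := by
  intro arr _ hD
  subst hD
  decide
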